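-- pv_equiv track=rewrite | github.com/priamoryki/ITMO | semester-4/discrete-math/Lab-1/TaskG.py | polynomial_pow
-- ===== SOURCE A (Python) =====
-- def polynomial_mul(a, b):
--     result = [0 for _ in range(len(a) + len(b) - 1)]
--     for i in range(len(a)):
--         for j in range(len(b)):
--             result[i + j] += a[i] * b[j]
--     return result[:7]
--
-- def polynomial_pow(a, n):
--     res = [1, 0, 0, 0, 0, 0, 0]
--     while n != 0:
--         if n % 2 == 1:
--             res = polynomial_mul(res, a)
--             n -= 1
--         else:
--             a = polynomial_mul(a, a)
--             n //= 2
--     return res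
-- ===== SOURCE B (Python) =====
-- def polynomial_mul(a, b):
--     result = [0 for _ in range(len(a) + len(b) - 1)]
--     for i in range(len(a)):
--         for j in range(len(b)):
--             result[i + j] += a[i] * b[j]
--     return result[:7]
--
-- def polynomial_pow(a, n):
--     # truncation to 7 coefficients is computation mod x^7: with a = a0 + x*t(x),
--     # a^n = sum_{j <= min(6, n)} C(n, j) * a0^(n-j) * x^j * t(x)^j  (mod x^7)
--     a0 = a[0] if a else 0
--     t = a[1:7]
--     res, tj, c = [0] * 7, [1], 1
--     for j in range(min(6, n) + 1):
--         s = c * a0 ** (n - j)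
--         for k in range(len(tj)):
--             if j + k < 7:
--                 res[j + k] += s * tj[k]
--         tj = polynomial_mul(tj, t)
--         c = c * (n - j) // (j + 1)
--     return res
-- ===== Notes on version B (the rewrite author's own statement) =====
-- stated objective: alternative
-- what changed: Replaced the square-and-multiply while-loop by a closed-form binomial expansion mod x^7: writing a = a0 + x*t, B accumulates C(n,j)*a0^(n-j)*t^j for j<=6, needing at most 7 small truncated multiplications regardless of n (A does O(log n) squarings whose coefficients grow huge).
-- outside the precondition, e.g. on polynomial_pow([], 1): A returns [0, 0, 0, 0, 0, 0], B returns [0, 0, 0, 0, 0, 0, 0]; on polynomial_pow([1], -1): A does not finish within the time limit, B returns [0, 0, 0, 0, 0, 0, 0]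
import Mathlib
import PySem

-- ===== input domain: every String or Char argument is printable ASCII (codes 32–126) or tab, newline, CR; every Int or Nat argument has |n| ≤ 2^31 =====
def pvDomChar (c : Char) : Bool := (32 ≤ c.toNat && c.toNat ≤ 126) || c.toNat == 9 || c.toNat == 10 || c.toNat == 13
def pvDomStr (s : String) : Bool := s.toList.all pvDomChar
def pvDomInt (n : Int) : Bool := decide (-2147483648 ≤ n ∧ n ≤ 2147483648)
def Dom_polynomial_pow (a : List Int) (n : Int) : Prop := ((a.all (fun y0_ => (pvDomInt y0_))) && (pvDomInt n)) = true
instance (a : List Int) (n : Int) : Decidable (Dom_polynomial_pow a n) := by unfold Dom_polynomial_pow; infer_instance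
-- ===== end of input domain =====

-- B replaces A's square-and-multiply loop with a closed-form binomial expansion mod x^7 (a = a0 + x*t, a^n = sum_j C(n,j) a0^(n-j) x^j t^j), a different algorithm needing O(1) truncated multiplications instead of O(log n).

-- ===== PORT A =====
-- polynomial_mul, shared helper of both Pythons (B keeps it verbatim): zero list of
-- length len(a)+len(b)-1 (Python range of a negative bound is empty, as is Nat subtraction),
-- the nested index loops, then result[:7].
def polynomial_mul (a b : List Int) : List Int :=
  ((List.range a.length).foldl (fun r i =>
    (List.range b.length).foldl (fun r j =>
      r.set (i + j) (r.getD (i + j) 0 + a.getD i 0 * b.getD j 0)) r)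
    (List.replicate (a.length + b.length - 1) 0)).take 7

-- the while-loop of A; the 'n ≤ 0' guard only makes the loop total: Python exits at n = 0
-- and diverges for n < 0 (excluded by Pre_).
def powLoopA (res a : List Int) (n : Int) : List Int :=
  if n ≤ 0 then res
  else if PySem.Int.mod n 2 = 1 then powLoopA (polynomial_mul res a) a (n - 1)
  else powLoopA res (polynomial_mul a a) (PySem.Int.floordiv n 2)
termination_by n.toNat
decreasing_by
  · omega
  · rw [PySem.Int.floordiv_eq_ediv_of_pos (by omega)]; omega

def polynomial_pow (a : List Int) (n : Int) : List Int :=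
  powLoopA [1, 0, 0, 0, 0, 0, 0] a n

-- ===== PORT B =====
-- the inner k-loop of B: res[j+k] += s * tj[k] whenever j+k < 7
def altInner (s : Int) (tj : List Int) (j : Nat) (res : List Int) : List Int :=
  (List.range tj.length).foldl (fun r k =>
    if j + k < 7 then r.set (j + k) (r.getD (j + k) 0 + s * tj.getD k 0) else r) res

-- one iteration of B's j-loop over the state (res, tj, c)
def altStep (a0 : Int) (t : List Int) (n : Int) (st : List Int × List Int × Int) (j : Nat) :
    List Int × List Int × Int :=
  (altInner (st.2.2 * a0 ^ (n - (j : Int)).toNat) st.2.1 j st.1,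
   polynomial_mul st.2.1 t,
   PySem.Int.floordiv (st.2.2 * (n - (j : Int))) ((j : Int) + 1))

def polynomial_pow_alt (a : List Int) (n : Int) : List Int :=
  ((List.range ((min 6 n + 1).toNat)).foldl
    (altStep (if a = [] then 0 else a.getD 0 0) ((a.drop 1).take 6) n)
    (List.replicate 7 0, [1], 1)).1

-- ===== PRECONDITION & SPEC =====
-- Pre_ excludes negative n, on which A's while-loop never terminates, and the empty
-- coefficient list with n ≥ 1, where A and B both return an all-zero result whose length
-- is an accident of each implementation's truncation bookkeeping (at ([], 1): A returns
-- [0,0,0,0,0,0], B returns [0,0,0,0,0,0,0]).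
def Pre_polynomial_pow (a : List Int) (n : Int) : Prop := 0 ≤ n ∧ (a ≠ [] ∨ n = 0)
instance (a : List Int) (n : Int) : Decidable (Pre_polynomial_pow a n) := by unfold Pre_polynomial_pow; infer_instance
def pvWitness_polynomial_pow : List Int × Int := ([1, 2, 3], 5)

def Spec_polynomial_pow (a : List Int) (n : Int) (out : List Int) : Prop := out = polynomial_pow_alt a n
instance (a : List Int) (n : Int) (out : List Int) : Decidable (Spec_polynomial_pow a n out) := by unfold Spec_polynomial_pow; infer_instance

-- ===== CLAIM (what is proved, stated in full; the proofs are below) =====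
def Claim_equal_polynomial_pow : Prop := ∀ (a : List Int) (n : Int), Dom_polynomial_pow a n → Pre_polynomial_pow a n → Spec_polynomial_pow a n (polynomial_pow a n)

-- ===== LEMMAS AND PROOFS =====

-- coefficient list as a polynomial (proof-side abstraction only)
noncomputable def toPoly (p : List Int) : Polynomial ℤ :=
  ∑ i ∈ Finset.range p.length, Polynomial.monomial i (p.getD i 0)

theorem toPoly_coeff (p : List Int) (k : ℕ) : (toPoly p).coeff k = p.getD k 0 := by
  unfold toPoly
  rw [Polynomial.finset_sum_coeff]
  simp only [Polynomial.coeff_monomial]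
  rw [Finset.sum_ite_eq' (Finset.range p.length) k (fun i => p.getD i 0)]
  by_cases h : k < p.length
  · simp [h]
  · rw [if_neg (by simpa using h), List.getD_eq_default p 0 (by omega)]

theorem coeff_mul_congr (f f' g g' : Polynomial ℤ)
    (hf : ∀ k < 7, f.coeff k = f'.coeff k) (hg : ∀ k < 7, g.coeff k = g'.coeff k) :
    ∀ k < 7, (f * g).coeff k = (f' * g').coeff k := by
  intro k hk
  rw [Polynomial.coeff_mul, Polynomial.coeff_mul]
  apply Finset.sum_congr rfl
  intro x hx
  rw [Finset.mem_antidiagonal] at hx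
  rw [hf x.1 (by omega), hg x.2 (by omega)]

theorem coeff_mul_vanish (p q : List Int) (k : ℕ) (hk : p.length + q.length - 1 ≤ k) :
    (toPoly p * toPoly q).coeff k = 0 := by
  rw [Polynomial.coeff_mul]
  apply Finset.sum_eq_zero
  intro x hx
  rw [Finset.mem_antidiagonal] at hx
  by_cases h : x.1 < p.length
  · rw [toPoly_coeff q, List.getD_eq_default q 0 (by omega), mul_zero]
  · rw [toPoly_coeff p, List.getD_eq_default p 0 (by omega), zero_mul]

-- the inner j-loop of polynomial_mul
theorem inner_len (q : List Int) (c : Int) (i m : ℕ) (r : List Int) :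
    ((List.range m).foldl (fun r j => r.set (i + j) (r.getD (i + j) 0 + c * q.getD j 0)) r).length
      = r.length := by
  induction m with
  | zero => rfl
  | succ m ih =>
    rw [List.range_succ, List.foldl_append]
    simp only [List.foldl_cons, List.foldl_nil]
    rw [List.length_set]
    exact ih

theorem inner_getD (q : List Int) (c : Int) (i m : ℕ) (r : List Int)
    (hm : i + m ≤ r.length) (k : ℕ) :
    ((List.range m).foldl (fun r j => r.set (i + j) (r.getD (i + j) 0 + c * q.getD j 0)) r).getD k 0
      = r.getD k 0 + (if i ≤ k ∧ k - i < m then c * q.getD (k - i) 0 else 0) := by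
  induction m with
  | zero => simp
  | succ m ih =>
    rw [List.range_succ, List.foldl_append]
    simp only [List.foldl_cons, List.foldl_nil]
    have hlen := inner_len q c i m r
    by_cases hk : k = i + m
    · subst hk
      rw [List.getD_eq_getElem?_getD, List.getElem?_set_self (by omega), Option.getD_some]
      rw [ih (by omega)]
      have h1 : ¬ (i ≤ i + m ∧ i + m - i < m) := by omega
      have h2 : (i ≤ i + m ∧ i + m - i < m + 1) := by omega
      rw [if_neg h1, if_pos h2]
      have h3 : i + m - i = m := by omega
      rw [h3]; ring
    · rw [List.getD_eq_getElem?_getD, List.getElem?_set_ne (by omega), ← List.getD_eq_getElem?_getD]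
      rw [ih (by omega)]
      congr 1
      have : (i ≤ k ∧ k - i < m) ↔ (i ≤ k ∧ k - i < m + 1) := by omega
      rw [if_congr this rfl rfl]

-- the outer i-loop of polynomial_mul
theorem outer_spec (p q : List Int) (I : ℕ) (hI : I ≤ p.length) :
    (((List.range I).foldl (fun r i =>
        (List.range q.length).foldl (fun r j =>
          r.set (i + j) (r.getD (i + j) 0 + p.getD i 0 * q.getD j 0)) r)
        (List.replicate (p.length + q.length - 1) 0)).length = p.length + q.length - 1)
    ∧ ∀ k : ℕ, (((List.range I).foldl (fun r i =>
        (List.range q.length).foldl (fun r j =>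
          r.set (i + j) (r.getD (i + j) 0 + p.getD i 0 * q.getD j 0)) r)
        (List.replicate (p.length + q.length - 1) 0)).getD k 0
      = ∑ i ∈ Finset.range I,
          (if i ≤ k ∧ k - i < q.length then p.getD i 0 * q.getD (k - i) 0 else 0)) := by
  induction I with
  | zero => simp
  | succ I ih =>
    obtain ⟨ihl, ihg⟩ := ih (by omega)
    rw [List.range_succ, List.foldl_append]
    simp only [List.foldl_cons, List.foldl_nil]
    constructor
    · rw [inner_len, ihl]
    · intro k
      rw [inner_getD _ _ _ _ _ (by rw [ihl]; omega), ihg, Finset.sum_range_succ]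

-- the truncated product, characterised through polynomial coefficients
theorem coeff_mul_as_sum (p q : List Int) (k : ℕ) :
    (toPoly p * toPoly q).coeff k
      = ∑ i ∈ Finset.range p.length,
          (if i ≤ k ∧ k - i < q.length then p.getD i 0 * q.getD (k - i) 0 else 0) := by
  rw [Polynomial.coeff_mul, Finset.Nat.sum_antidiagonal_eq_sum_range_succ_mk]
  simp only [toPoly_coeff]
  have step1 : ∀ i ∈ Finset.range (k+1),
      p.getD i 0 * q.getD (k - i) 0
        = (if i ≤ k ∧ k - i < q.length then p.getD i 0 * q.getD (k - i) 0 else 0) := by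
    intro i hi
    rw [Finset.mem_range] at hi
    by_cases h : k - i < q.length
    · rw [if_pos ⟨by omega, h⟩]
    · rw [if_neg (fun hc => h hc.2), List.getD_eq_default q 0 (by omega), mul_zero]
  rw [Finset.sum_congr rfl step1]
  have hz1 : ∀ i, k < i →
      (if i ≤ k ∧ k - i < q.length then p.getD i 0 * q.getD (k - i) 0 else 0) = 0 := by
    intro i h
    rw [if_neg (by omega)]
  have hz2 : ∀ i, p.length ≤ i →
      (if i ≤ k ∧ k - i < q.length then p.getD i 0 * q.getD (k - i) 0 else 0) = 0 := by
    intro i h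
    split_ifs with hc
    · rw [List.getD_eq_default p 0 (by omega), zero_mul]
    · rfl
  have hs1 : Finset.range (k+1) ⊆ Finset.range (max (k+1) p.length) := by
    intro x hx; simp only [Finset.mem_range] at hx ⊢; omega
  have hs2 : Finset.range p.length ⊆ Finset.range (max (k+1) p.length) := by
    intro x hx; simp only [Finset.mem_range] at hx ⊢; omega
  have e1 := Finset.sum_subset hs1
      (f := fun i => if i ≤ k ∧ k - i < q.length then p.getD i 0 * q.getD (k - i) 0 else 0)
      (fun i hi hni => hz1 i (by simp only [Finset.mem_range] at hni; omega))
  have e2 := Finset.sum_subset hs2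
      (f := fun i => if i ≤ k ∧ k - i < q.length then p.getD i 0 * q.getD (k - i) 0 else 0)
      (fun i hi hni => hz2 i (by simp only [Finset.mem_range] at hni; omega))
  rw [e1, e2]

theorem mul_eq (p q : List Int) :
    polynomial_mul p q =
      (List.range (min 7 (p.length + q.length - 1))).map
        (fun k => (toPoly p * toPoly q).coeff k) := by
  obtain ⟨hl, hg⟩ := outer_spec p q p.length le_rfl
  unfold polynomial_mul
  apply List.ext_getElem
  · rw [List.length_take, hl, List.length_map, List.length_range]
  · intro k h1 h2
    have hk : k < min 7 (p.length + q.length - 1) := by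
      rw [List.length_take, hl] at h1; omega
    rw [List.getElem_take, List.getElem_map, List.getElem_range]
    have hkl : k < (((List.range p.length).foldl (fun r i =>
        (List.range q.length).foldl (fun r j =>
          r.set (i + j) (r.getD (i + j) 0 + p.getD i 0 * q.getD j 0)) r)
        (List.replicate (p.length + q.length - 1) 0))).length := by
      rw [hl]; omega
    rw [← List.getD_eq_getElem _ 0 hkl, hg k, coeff_mul_as_sum]

-- truncated multiplication of a length-7 list by a nonempty list
theorem mul_cpow (res a : List Int) (f g : Polynomial ℤ)
    (hr : res.length = 7) (ha : 1 ≤ a.length)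
    (hf : ∀ k < 7, (toPoly res).coeff k = f.coeff k)
    (hg : ∀ k < 7, (toPoly a).coeff k = g.coeff k) :
    polynomial_mul res a = (List.range 7).map (fun k => (f * g).coeff k) := by
  rw [mul_eq]
  have hmin : min 7 (res.length + a.length - 1) = 7 := by omega
  rw [hmin]
  apply List.map_congr_left
  intro k hk
  rw [List.mem_range] at hk
  exact coeff_mul_congr _ _ _ _ hf hg k hk

theorem cpow_coeff (f : Polynomial ℤ) :
    ∀ k < 7, (toPoly ((List.range 7).map (fun k => f.coeff k))).coeff k = f.coeff k := by
  intro k hk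
  rw [toPoly_coeff, List.getD_eq_getElem _ _ (by simp [hk]), List.getElem_map, List.getElem_range]

theorem cpow_ext (res : List Int) (f : Polynomial ℤ) (hr : res.length = 7)
    (hf : ∀ k < 7, (toPoly res).coeff k = f.coeff k) :
    res = (List.range 7).map (fun k => f.coeff k) := by
  apply List.ext_getElem (by simp [hr])
  intro k h1 h2
  have hk : k < 7 := by omega
  have h := hf k hk
  rw [toPoly_coeff, List.getD_eq_getElem _ _ (by omega)] at h
  rw [List.getElem_map, List.getElem_range, ← h]

theorem square_coeff (a : List Int) (g : Polynomial ℤ) (ha : 1 ≤ a.length)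
    (hg : ∀ k < 7, (toPoly a).coeff k = g.coeff k) :
    ∀ k < 7, (toPoly (polynomial_mul a a)).coeff k = (g * g).coeff k := by
  intro k hk
  have hcg := coeff_mul_congr _ _ _ _ hg hg k hk
  rw [mul_eq, toPoly_coeff]
  by_cases h : k < min 7 (a.length + a.length - 1)
  · rw [List.getD_eq_getElem _ _ (by simpa using h), List.getElem_map, List.getElem_range]
    exact hcg
  · rw [List.getD_eq_default _ 0 (by simp only [List.length_map, List.length_range]; omega)]
    rw [← hcg, eq_comm]
    exact coeff_mul_vanish a a k (by omega)

theorem square_len (a : List Int) (ha : 1 ≤ a.length) : 1 ≤ (polynomial_mul a a).length := by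
  rw [mul_eq]
  simp only [List.length_map, List.length_range]
  omega

theorem loopA_eq (m : ℕ) : ∀ (n : Int) (res a : List Int) (f g : Polynomial ℤ),
    n.toNat = m → 0 ≤ n → res.length = 7 → 1 ≤ a.length →
    (∀ k < 7, (toPoly res).coeff k = f.coeff k) →
    (∀ k < 7, (toPoly a).coeff k = g.coeff k) →
    powLoopA res a n = (List.range 7).map (fun k => (f * g ^ n.toNat).coeff k) := by
  induction m using Nat.strong_induction_on with
  | _ m ih =>
    intro n res a f g hm hn hr ha hf hg
    rw [powLoopA]
    split_ifs with h0 hodd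
    · have hn0 : n = 0 := by omega
      subst hn0
      simp only [Int.toNat_zero, pow_zero, mul_one]
      exact cpow_ext res f hr hf
    · have hmod : n % 2 = 1 := by
        rw [← PySem.Int.mod_eq_emod_of_pos (by omega : (0:Int) < 2)]; exact hodd
      have hpos : 0 < n := by omega
      have hmul := mul_cpow res a f g hr ha hf hg
      have hrec := ih ((n-1).toNat) (by omega) (n-1) (polynomial_mul res a) a (f * g) g
        rfl (by omega) (by rw [hmul]; simp) ha (by rw [hmul]; exact cpow_coeff (f * g)) hg
      rw [hrec]
      have hp : f * g * g ^ (n-1).toNat = f * g ^ n.toNat := by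
        have hsucc : n.toNat = (n-1).toNat + 1 := by omega
        rw [hsucc, pow_succ]; ring
      rw [hp]
    · have hmod : n % 2 = 0 := by
        have := hodd
        rw [PySem.Int.mod_eq_emod_of_pos (by omega : (0:Int) < 2)] at this
        omega
      have hpos : 0 < n := by omega
      rw [PySem.Int.floordiv_eq_ediv_of_pos (by omega : (0:Int) < 2)]
      have hrec := ih ((n / 2).toNat) (by omega) (n / 2) res (polynomial_mul a a) f (g * g)
        rfl (by omega) hr (square_len a ha) hf (square_coeff a g ha hg)
      rw [hrec]
      have hp : f * (g * g) ^ (n / 2).toNat = f * g ^ n.toNat := by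
        have h2 : n.toNat = 2 * (n / 2).toNat := by omega
        rw [h2, pow_mul]
        ring_nf
      rw [hp]

-- ===== B-side lemmas =====
theorem mul_toPoly_coeff (p q : List Int) : ∀ k < 7,
    (toPoly (polynomial_mul p q)).coeff k = (toPoly p * toPoly q).coeff k := by
  intro k hk
  rw [mul_eq, toPoly_coeff]
  by_cases h : k < min 7 (p.length + q.length - 1)
  · rw [List.getD_eq_getElem _ _ (by simpa using h), List.getElem_map, List.getElem_range]
  · rw [List.getD_eq_default _ 0 (by simp only [List.length_map, List.length_range]; omega)]
    exact (coeff_mul_vanish p q k (by omega)).symm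

theorem pow_coeff_congr (f f' : Polynomial ℤ) (h : ∀ k < 7, f.coeff k = f'.coeff k) (m : ℕ) :
    ∀ k < 7, (f ^ m).coeff k = (f' ^ m).coeff k := by
  induction m with
  | zero => intro k hk; rfl
  | succ m ih =>
    intro k hk
    rw [pow_succ, pow_succ]
    exact coeff_mul_congr _ _ _ _ ih h k hk

theorem altInner_len_aux (s : Int) (tj : List Int) (j m : ℕ) (res : List Int) :
    ((List.range m).foldl (fun r k =>
        if j + k < 7 then r.set (j + k) (r.getD (j + k) 0 + s * tj.getD k 0) else r) res).length
      = res.length := by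
  induction m with
  | zero => rfl
  | succ m ih =>
    rw [List.range_succ, List.foldl_append]
    simp only [List.foldl_cons, List.foldl_nil]
    split_ifs
    · rw [List.length_set]; exact ih
    · exact ih

theorem altInner_getD_aux (s : Int) (tj : List Int) (j m : ℕ) (res : List Int)
    (hres : res.length = 7) (k : ℕ) :
    ((List.range m).foldl (fun r k' =>
        if j + k' < 7 then r.set (j + k') (r.getD (j + k') 0 + s * tj.getD k' 0) else r) res).getD k 0
      = res.getD k 0 + (if j ≤ k ∧ k - j < m ∧ k < 7 then s * tj.getD (k - j) 0 else 0) := by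
  induction m with
  | zero => simp
  | succ m ih =>
    rw [List.range_succ, List.foldl_append]
    simp only [List.foldl_cons, List.foldl_nil]
    have hlen := altInner_len_aux s tj j m res
    by_cases h7 : j + m < 7
    · rw [if_pos h7]
      by_cases hk : k = j + m
      · subst hk
        rw [List.getD_eq_getElem?_getD, List.getElem?_set_self (by omega), Option.getD_some]
        rw [ih]
        have h1 : ¬ (j ≤ j + m ∧ j + m - j < m ∧ j + m < 7) := by omega
        have h2 : (j ≤ j + m ∧ j + m - j < m + 1 ∧ j + m < 7) := by omega
        rw [if_neg h1, if_pos h2]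
        have h3 : j + m - j = m := by omega
        rw [h3]
        ring
      · rw [List.getD_eq_getElem?_getD, List.getElem?_set_ne (by omega), ← List.getD_eq_getElem?_getD]
        rw [ih]
        congr 1
        have : (j ≤ k ∧ k - j < m ∧ k < 7) ↔ (j ≤ k ∧ k - j < m + 1 ∧ k < 7) := by omega
        rw [if_congr this rfl rfl]
    · rw [if_neg h7, ih]
      congr 1
      have : (j ≤ k ∧ k - j < m ∧ k < 7) ↔ (j ≤ k ∧ k - j < m + 1 ∧ k < 7) := by omega
      rw [if_congr this rfl rfl]

theorem getD_replicate_zero (k : ℕ) : (List.replicate 7 (0:Int)).getD k 0 = 0 := by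
  by_cases h : k < 7
  · rw [List.getD_eq_getElem _ _ (by simpa using h), List.getElem_replicate]
  · rw [List.getD_eq_default _ 0 (by simpa using h)]

theorem altLoop (n : Int) (hn : 0 ≤ n) (a0 : Int) (t : List Int) :
    ∀ J : ℕ, J ≤ min 6 n.toNat + 1 →
    (((List.range J).foldl (altStep a0 t n) (List.replicate 7 0, [1], 1)).1.length = 7)
    ∧ (∀ k : ℕ, ((List.range J).foldl (altStep a0 t n) (List.replicate 7 0, [1], 1)).1.getD k 0
        = ∑ j ∈ Finset.range J, if j ≤ k ∧ k < 7 then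
            (n.toNat.choose j : Int) * a0 ^ (n.toNat - j) * ((toPoly t) ^ j).coeff (k - j) else 0)
    ∧ (∀ k < 7, (toPoly ((List.range J).foldl (altStep a0 t n) (List.replicate 7 0, [1], 1)).2.1).coeff k
        = ((toPoly t) ^ J).coeff k)
    ∧ ((List.range J).foldl (altStep a0 t n) (List.replicate 7 0, [1], 1)).2.2 = (n.toNat.choose J : Int) := by
  intro J
  induction J with
  | zero =>
    intro _
    refine ⟨by simp, fun k => ?_, fun k hk => ?_, by simp⟩
    · rw [List.range_zero, List.foldl_nil, Finset.range_zero, Finset.sum_empty]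
      exact getD_replicate_zero k
    rw [toPoly_coeff, pow_zero, Polynomial.coeff_one]
    cases k with
    | zero => simp
    | succ m => simp
  | succ J ih =>
    intro hJ
    have hJ6 : J ≤ 6 := by omega
    have hJN : J ≤ n.toNat := by omega
    obtain ⟨ih1, ih2, ih3, ih4⟩ := ih (by omega)
    rw [List.range_succ, List.foldl_append]
    simp only [List.foldl_cons, List.foldl_nil]
    set stJ := (List.range J).foldl (altStep a0 t n) (List.replicate 7 0, [1], 1) with hst
    have htoNat : ((n : Int) - (J : Int)).toNat = n.toNat - J := by omega
    have hcastNJ : (n : Int) - (J : Int) = ((n.toNat - J : ℕ) : Int) := by omega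
    refine ⟨?_, ?_, ?_, ?_⟩
    · show (altInner _ _ _ _).length = 7
      unfold altInner
      rw [altInner_len_aux, ih1]
    · intro k
      show (altInner _ _ _ _).getD k 0 = _
      unfold altInner
      rw [altInner_getD_aux _ _ _ _ _ ih1, ih2, Finset.sum_range_succ]
      congr 1
      rw [ih4, htoNat]
      by_cases hc : J ≤ k ∧ k < 7
      · by_cases hl : k - J < stJ.2.1.length
        · rw [if_pos ⟨hc.1, hl, hc.2⟩, if_pos hc]
          have := ih3 (k - J) (by omega)
          rw [toPoly_coeff] at this
          rw [this]
        · rw [if_neg (by omega), if_pos hc]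
          have := ih3 (k - J) (by omega)
          rw [toPoly_coeff, List.getD_eq_default _ 0 (by omega)] at this
          rw [← this, mul_zero]
      · rw [if_neg (by omega), if_neg hc]
    · intro k hk
      show (toPoly (polynomial_mul stJ.2.1 t)).coeff k = _
      rw [mul_toPoly_coeff _ _ k hk, pow_succ]
      exact coeff_mul_congr _ _ _ _ ih3 (fun _ _ => rfl) k hk
    · show PySem.Int.floordiv (stJ.2.2 * ((n : Int) - (J : Int))) ((J : Int) + 1) = _
      rw [ih4, hcastNJ]
      have hnat := Nat.choose_succ_right_eq n.toNat J
      have hmul : (n.toNat.choose J : Int) * ((n.toNat - J : ℕ) : Int)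
          = (n.toNat.choose (J + 1) : Int) * ((J : Int) + 1) := by
        rw [← Nat.cast_mul, ← hnat, Nat.cast_mul]
        push_cast
        ring
      rw [hmul, PySem.Int.floordiv_eq_ediv_of_pos (by omega)]
      exact Int.mul_ediv_cancel _ (by omega)

theorem binomial_coeff (a0 : Int) (T : Polynomial ℤ) (N k : ℕ) (hk : k < 7) :
    ((Polynomial.C a0 + Polynomial.X * T) ^ N).coeff k
      = ∑ j ∈ Finset.range (min 6 N + 1),
          (if j ≤ k ∧ k < 7 then (N.choose j : Int) * a0 ^ (N - j) * (T ^ j).coeff (k - j) else 0) := by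
  rw [add_comm (Polynomial.C a0) (Polynomial.X * T), add_pow, Polynomial.finset_sum_coeff]
  have hterm : ∀ j, ((Polynomial.X * T) ^ j * Polynomial.C a0 ^ (N - j) * ((N.choose j : ℕ) : Polynomial ℤ)).coeff k
      = (if j ≤ k ∧ k < 7 then (N.choose j : Int) * a0 ^ (N - j) * (T ^ j).coeff (k - j) else 0) := by
    intro j
    have h1 : (Polynomial.X * T) ^ j * Polynomial.C a0 ^ (N - j) * ((N.choose j : ℕ) : Polynomial ℤ)
        = (T ^ j * Polynomial.C (a0 ^ (N - j) * (N.choose j : Int))) * Polynomial.X ^ j := by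
      rw [mul_pow, ← Polynomial.C_pow, ← Polynomial.C_eq_natCast, Polynomial.C_mul]
      ring
    rw [h1, Polynomial.coeff_mul_X_pow']
    by_cases hj : j ≤ k
    · rw [if_pos hj, if_pos ⟨hj, hk⟩, Polynomial.coeff_mul_C]
      ring
    · rw [if_neg hj, if_neg (by omega)]
  rw [Finset.sum_congr rfl (fun j _ => hterm j)]
  by_cases hN : N ≤ 6
  · have h : min 6 N = N := by omega
    rw [h]
  · have h : min 6 N = 6 := by omega
    rw [h]
    symm
    apply Finset.sum_subset
    · intro x hx
      simp only [Finset.mem_range] at hx ⊢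
      omega
    · intro j _ hnj
      simp only [Finset.mem_range] at hnj
      rw [if_neg (by omega)]

theorem toPoly_split (a : List Int) : ∀ k < 7,
    (toPoly a).coeff k
      = (Polynomial.C (if a = [] then 0 else a.getD 0 0)
          + Polynomial.X * toPoly ((a.drop 1).take 6)).coeff k := by
  intro k hk
  rw [Polynomial.coeff_add, toPoly_coeff]
  cases k with
  | zero =>
    rw [Polynomial.mul_coeff_zero, Polynomial.coeff_X_zero, zero_mul, add_zero, Polynomial.coeff_C]
    by_cases ha : a = [] <;> simp [ha]
  | succ m =>
    rw [Polynomial.coeff_C, if_neg (by omega), Polynomial.coeff_X_mul, toPoly_coeff, zero_add]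
    have hm : m < 6 := by omega
    simp [List.getD_eq_getElem?_getD, hm, Nat.add_comm 1 m]

theorem altPow_eq (a : List Int) (n : Int) (hn : 0 ≤ n) :
    polynomial_pow_alt a n = (List.range 7).map (fun k => ((toPoly a) ^ n.toNat).coeff k) := by
  have hcnt : (min 6 n + 1).toNat = min 6 n.toNat + 1 := by omega
  unfold polynomial_pow_alt
  rw [hcnt]
  obtain ⟨h1, h2, -, -⟩ := altLoop n hn (if a = [] then 0 else a.getD 0 0)
    ((a.drop 1).take 6) (min 6 n.toNat + 1) le_rfl
  apply List.ext_getElem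
  · rw [h1, List.length_map, List.length_range]
  · intro k hk1 hk2
    have hk : k < 7 := by rw [h1] at hk1; exact hk1
    rw [List.getElem_map, List.getElem_range, ← List.getD_eq_getElem _ 0 hk1, h2 k]
    rw [← binomial_coeff _ _ _ _ hk]
    exact (pow_coeff_congr _ _ (toPoly_split a) n.toNat k hk).symm

-- ===== VERDICT (by name: the statement is the Claim_ definition above) =====
theorem polynomial_pow_spec : Claim_equal_polynomial_pow := by
  intro a n _ hpre
  obtain ⟨hn, hcase⟩ := hpre
  unfold Spec_polynomial_pow
  by_cases ha : a = []
  · subst ha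
    have hn0 : n = 0 := hcase.resolve_left (fun h => h rfl)
    subst hn0
    unfold polynomial_pow
    rw [powLoopA, if_pos (by omega)]
    decide
  · have hlen : 1 ≤ a.length := by
      cases a with
      | nil => exact absurd rfl ha
      | cons x xs => simp
    have hA := loopA_eq n.toNat n [1,0,0,0,0,0,0] a (toPoly [1,0,0,0,0,0,0]) (toPoly a)
      rfl hn (by decide) hlen (fun k _ => rfl) (fun k _ => rfl)
    have hone : ∀ k < 7, (toPoly [1,0,0,0,0,0,0]).coeff k = (1 : Polynomial ℤ).coeff k := by
      intro k hk
      rw [toPoly_coeff, Polynomial.coeff_one]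
      interval_cases k <;> simp
    unfold polynomial_pow
    rw [hA, altPow_eq a n hn]
    apply List.map_congr_left
    intro k hk
    rw [List.mem_range] at hk
    rw [coeff_mul_congr _ 1 _ _ hone (fun _ _ => rfl) k hk, one_mul]
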